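-- pv_equiv track=rewrite | github.com/ozlyplm-tech/gdz | app.py | _looks_math_heavy
-- ===== SOURCE A (Python) =====
-- def _looks_math_heavy(t: str) -> bool:
--     t = t or ""
--     triggers = [
--         "\\frac", "\\sqrt", "\\sum", "\\int", "\\ge", "\\le", "\\neq",
--         "\\rightarrow", "\\left", "\\right", "\\cdot", "\\times",
--         "\\mathbb", "\\overline", "\\underline", "$", "^{", "_{"
--     ]
--     return len(t) > 700 or any(x in t for x in triggers)
-- ===== SOURCE B (Python) =====
-- _WORDS = ("frac", "sqrt", "sum", "int", "ge", "le", "neq",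
--           "rightarrow", "left", "right", "cdot", "times",
--           "mathbb", "overline", "underline")
--
--
-- def _looks_math_heavy(t: str) -> bool:
--     t = t or ""
--     if len(t) > 700:
--         return True
--     for i in range(len(t)):
--         c = t[i]
--         if c == '$':
--             return True
--         if (c == '^' or c == '_') and t.startswith('{', i + 1):
--             return True
--         if c == '\\' and any(t.startswith(w, i + 1) for w in _WORDS):
--             return True
--     return False
-- ===== Notes on version B (the rewrite author's own statement) =====
-- stated objective: alternative
-- what changed: Replaces 18 independent substring scans (any(x in t)) with a single left-to-right pass that dispatches on the character at each position ('$', '^'/'_' followed by '{', or '\' followed by one of 15 command words) and can return as soon as a trigger is found.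
import Mathlib
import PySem

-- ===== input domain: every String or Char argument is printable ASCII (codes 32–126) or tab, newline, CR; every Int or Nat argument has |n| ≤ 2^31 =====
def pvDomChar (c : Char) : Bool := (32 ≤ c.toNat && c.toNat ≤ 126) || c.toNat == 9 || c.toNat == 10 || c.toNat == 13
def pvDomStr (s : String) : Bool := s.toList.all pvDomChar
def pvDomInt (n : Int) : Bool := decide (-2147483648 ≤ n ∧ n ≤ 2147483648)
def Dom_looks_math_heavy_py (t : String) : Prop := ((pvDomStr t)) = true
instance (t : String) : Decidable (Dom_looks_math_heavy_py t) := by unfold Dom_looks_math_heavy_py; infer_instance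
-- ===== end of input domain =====

-- B replaces A's 18 separate substring scans with one left-to-right pass that dispatches
-- on the character at each position (alternative traversal; no speed claim).


-- ===== PORT A =====
def looks_math_heavy_py (t : String) : Bool :=
  -- t = t or "" is the identity on every String argument (an empty t is replaced by "")
  let triggers : List String :=
    ["\\frac", "\\sqrt", "\\sum", "\\int", "\\ge", "\\le", "\\neq",
     "\\rightarrow", "\\left", "\\right", "\\cdot", "\\times",
     "\\mathbb", "\\overline", "\\underline", "$", "^{", "_{"]
  decide ((700 : Int) < PySem.Str.len t) || triggers.any (fun x => PySem.Str.isIn x t)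

-- ===== PORT B =====
def mhWords : List (List Char) :=
  ["frac".toList, "sqrt".toList, "sum".toList, "int".toList, "ge".toList,
   "le".toList, "neq".toList, "rightarrow".toList, "left".toList, "right".toList,
   "cdot".toList, "times".toList, "mathbb".toList, "overline".toList, "underline".toList]

-- the position loop of Source B, as structural recursion on the suffix starting at position i;
-- t.startswith(w, i + 1) is w.isPrefixOf applied to the tail after position i (exact)
def mhScan : List Char → Bool
  | [] => false
  | c :: cs =>
    if c = '$' then true
    else if (c = '^' || c = '_') && List.isPrefixOf ['{'] cs then true
    else if c = '\\' && mhWords.any (fun w => List.isPrefixOf w cs) then true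
    else mhScan cs

def looks_math_heavy_py_alt (t : String) : Bool :=
  if (700 : Int) < PySem.Str.len t then true
  else mhScan t.toList

-- ===== PRECONDITION & SPEC =====
def Spec_looks_math_heavy_py (t : String) (out : Bool) : Prop := out = looks_math_heavy_py_alt t
instance (t : String) (out : Bool) : Decidable (Spec_looks_math_heavy_py t out) := by unfold Spec_looks_math_heavy_py; infer_instance

-- ===== CLAIM (what is proved, stated in full; the proofs are below) =====
def Claim_equal_looks_math_heavy_py : Prop := ∀ (t : String), Dom_looks_math_heavy_py t → Spec_looks_math_heavy_py t (looks_math_heavy_py t)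

-- ===== LEMMAS AND PROOFS =====

-- A's trigger list on the character-list side (explicit literals, for case analysis)
def mhTriggers : List (List Char) :=
  [['\\','f','r','a','c'], ['\\','s','q','r','t'], ['\\','s','u','m'], ['\\','i','n','t'],
   ['\\','g','e'], ['\\','l','e'], ['\\','n','e','q'],
   ['\\','r','i','g','h','t','a','r','r','o','w'], ['\\','l','e','f','t'],
   ['\\','r','i','g','h','t'], ['\\','c','d','o','t'], ['\\','t','i','m','e','s'],
   ['\\','m','a','t','h','b','b'], ['\\','o','v','e','r','l','i','n','e'],
   ['\\','u','n','d','e','r','l','i','n','e'], ['$'], ['^','{'], ['_','{']]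

lemma mhScan_iff (cs : List Char) :
    mhScan cs = true ↔ ∃ x ∈ mhTriggers, x <:+: cs := by
  induction cs with
  | nil => simp [mhScan, mhTriggers]
  | cons c cs ih =>
    rw [mhScan]
    constructor
    · intro h
      split_ifs at h with h1 h2 h3
      · exact ⟨['$'], by decide,
          List.infix_cons_iff.mpr (Or.inl (List.cons_prefix_cons.mpr ⟨h1.symm, List.nil_prefix⟩))⟩
      · rcases Bool.and_eq_true .. |>.mp h2 with ⟨hc, hp⟩
        rcases Bool.or_eq_true .. |>.mp hc with hc | hc
        · exact ⟨['^','{'], by decide, List.infix_cons_iff.mpr (Or.inl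
            (List.cons_prefix_cons.mpr ⟨(of_decide_eq_true hc).symm, List.isPrefixOf_iff_prefix.mp hp⟩))⟩
        · exact ⟨['_','{'], by decide, List.infix_cons_iff.mpr (Or.inl
            (List.cons_prefix_cons.mpr ⟨(of_decide_eq_true hc).symm, List.isPrefixOf_iff_prefix.mp hp⟩))⟩
      · rcases Bool.and_eq_true .. |>.mp h3 with ⟨hc, hw⟩
        rcases List.any_eq_true.mp hw with ⟨w, hwmem, hwp⟩
        refine ⟨'\\' :: w, ?_, List.infix_cons_iff.mpr (Or.inl (List.cons_prefix_cons.mpr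
          ⟨(of_decide_eq_true hc).symm, List.isPrefixOf_iff_prefix.mp hwp⟩))⟩
        fin_cases hwmem <;> decide
      · rcases ih.mp h with ⟨x, hx, hinf⟩
        exact ⟨x, hx, hinf.trans (List.suffix_cons c cs).isInfix⟩
    · rintro ⟨x, hx, hinf⟩
      rcases List.infix_cons_iff.mp hinf with hpre | hinf'
      · -- x is a prefix of c :: cs, so the dispatch on c fires: the result is true
        split_ifs with h1 h2 h3
        · rfl
        · rfl
        · rfl
        · exfalso
          fin_cases hx <;> rw [List.cons_prefix_cons] at hpre <;>
            (obtain ⟨he, hp⟩ := hpre; subst he;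
             simp [mhWords, List.isPrefixOf_iff_prefix, hp] at h1 h2 h3)
      · split_ifs with h1 h2 h3
        · rfl
        · rfl
        · rfl
        · exact ih.mpr ⟨x, hx, hinf'⟩

lemma mhScan_eq_any (cs : List Char) :
    (mhTriggers.any fun x => PySem.Chars.isIn x cs) = mhScan cs := by
  rw [Bool.eq_iff_iff, List.any_eq_true, mhScan_iff]
  constructor
  · rintro ⟨x, hx, h⟩; exact ⟨x, hx, (PySem.Chars.isIn_iff_infix x cs).mp h⟩
  · rintro ⟨x, hx, h⟩; exact ⟨x, hx, (PySem.Chars.isIn_iff_infix x cs).mpr h⟩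

-- ===== VERDICT (by name: the statement is the Claim_ definition above) =====
theorem looks_math_heavy_py_spec : Claim_equal_looks_math_heavy_py := by
  intro t _
  show looks_math_heavy_py t = looks_math_heavy_py_alt t
  have hA : looks_math_heavy_py t
      = (decide ((700 : Int) < PySem.Str.len t) || mhScan t.toList) := by
    show (decide ((700 : Int) < PySem.Str.len t) ||
        (["\\frac", "\\sqrt", "\\sum", "\\int", "\\ge", "\\le", "\\neq",
          "\\rightarrow", "\\left", "\\right", "\\cdot", "\\times",
          "\\mathbb", "\\overline", "\\underline", "$", "^{", "_{"] : List String).any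
          (fun x => PySem.Str.isIn x t)) = _
    rw [← mhScan_eq_any t.toList]
    simp [PySem.Str.isIn, List.any, mhTriggers]
  rw [hA]
  unfold looks_math_heavy_py_alt
  simp
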